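-- pv_equiv track=rewrite | github.com/numataraiki/role-decision | role_decision.py | classify_by_rank
-- ===== SOURCE A (Python) =====
-- def classify_by_rank(hand):
--     rank_counts = {}
--     for suit, rank in hand:
--         if rank in rank_counts:
--             rank_counts[rank] += 1
--         else:
--             rank_counts[rank] = 1
--     return sorted(rank_counts.values(), reverse=True)
-- ===== SOURCE B (Python) =====
-- def _run_lengths(rs):
--     # rs is sorted, so equal ranks are adjacent: emit each run's length.
--     if not rs:
--         return []
--     x = rs[0]
--     i = 1
--     while i < len(rs) and rs[i] == x:
--         i += 1
--     return [i] + _run_lengths(rs[i:])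
--
-- def classify_by_rank(hand):
--     ranks = sorted(rank for _, rank in hand)
--     return sorted(_run_lengths(ranks), reverse=True)
-- ===== Notes on version B (the rewrite author's own statement) =====
-- stated objective: alternative
-- what changed: Replaces the hash-dict counting pass by sort-then-group: sort the ranks, compute run lengths of consecutive equal ranks recursively, then sort those multiplicities descending.
import Mathlib
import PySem

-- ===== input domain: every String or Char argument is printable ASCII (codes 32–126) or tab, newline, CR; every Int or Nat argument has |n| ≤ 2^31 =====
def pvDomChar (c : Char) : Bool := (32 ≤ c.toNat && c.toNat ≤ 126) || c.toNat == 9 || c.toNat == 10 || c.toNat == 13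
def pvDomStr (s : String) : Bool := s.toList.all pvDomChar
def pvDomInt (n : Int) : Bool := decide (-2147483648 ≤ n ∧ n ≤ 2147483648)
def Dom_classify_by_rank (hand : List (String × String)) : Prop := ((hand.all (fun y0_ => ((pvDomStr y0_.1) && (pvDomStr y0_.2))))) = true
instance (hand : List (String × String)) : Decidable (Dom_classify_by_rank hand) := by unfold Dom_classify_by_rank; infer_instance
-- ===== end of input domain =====

-- B groups a sorted copy of the ranks into runs instead of counting with a dict; same result, alternative algorithm.

-- ===== PORT A =====
def classify_by_rank (hand : List (String × String)) : List Int :=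
  let rank_counts : PySem.Dict String Int :=
    hand.foldl (fun d p =>
      if d.contains p.2 then d.modify p.2 0 (· + 1) else d.insert p.2 1)
      PySem.Dict.empty
  PySem.List.sorted rank_counts.values (fun x => x) true

-- ===== PORT B =====
-- run lengths of consecutive equal elements (B's recursive _run_lengths)
def pvRunLengths : List String → List Int
  | [] => []
  | x :: xs =>
    ((1 : Int) + (xs.takeWhile (· == x)).length) :: pvRunLengths (xs.dropWhile (· == x))
  termination_by rs => rs.length
  decreasing_by
    exact Nat.lt_succ_of_le (List.length_dropWhile_le _ _)

def classify_by_rank_alt (hand : List (String × String)) : List Int :=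
  let ranks := PySem.List.sorted (hand.map (·.2)) (fun x => x) false
  PySem.List.sorted (pvRunLengths ranks) (fun x => x) true

-- ===== PRECONDITION & SPEC =====
def Spec_classify_by_rank (hand : List (String × String)) (out : List Int) : Prop := out = classify_by_rank_alt hand
instance (hand : List (String × String)) (out : List Int) : Decidable (Spec_classify_by_rank hand out) := by unfold Spec_classify_by_rank; infer_instance

-- ===== CLAIM (what is proved, stated in full; the proofs are below) =====
def Claim_equal_classify_by_rank : Prop := ∀ (hand : List (String × String)), Dom_classify_by_rank hand → Spec_classify_by_rank hand (classify_by_rank hand)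

-- ===== LEMMAS AND PROOFS =====

-- A's loop body is exactly the Counter step.
lemma stepA_eq_counter_step :
    (fun (d : PySem.Dict String Int) (p : String × String) =>
      if d.contains p.2 then d.modify p.2 0 (· + 1) else d.insert p.2 1)
    = (fun d p => d.modify p.2 0 (· + 1)) := by
  funext d p
  by_cases h : d.contains p.2
  · simp [h]
  · have h' : d.contains p.2 = false := by simpa using h
    simp [h, PySem.Dict.modify, PySem.Dict.getD_of_not_contains]

-- A's dict is Counter(ranks).
lemma dictA_eq_counter (hand : List (String × String)) :
    hand.foldl (fun d p =>
      if d.contains p.2 then d.modify p.2 0 (· + 1) else d.insert p.2 1)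
      PySem.Dict.empty
    = PySem.Dict.counter (hand.map (·.2)) := by
  rw [stepA_eq_counter_step, PySem.Dict.counter_eq_foldl, List.foldl_map]

-- if x does not occur in b, removing x from set(a ++ b) with a all-x gives set(b)
lemma discard_of_not_mem (s : List String) (x : String) (h : x ∉ s) :
    PySem.Set.discard s x = s := by
  simp only [PySem.Set.discard]
  apply List.filter_eq_self.2
  intro a ha
  simp only [Bool.not_eq_eq_eq_not, Bool.not_true, beq_eq_false_iff_ne, ne_eq]
  exact fun hax => h (hax ▸ ha)

lemma ofList_all_eq_append (x : String) (a b : List String)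
    (ha : ∀ y ∈ a, y = x) (hb : x ∉ b) :
    PySem.Set.discard (PySem.Set.ofList (a ++ b)) x = PySem.Set.ofList b := by
  induction a with
  | nil => exact discard_of_not_mem _ _ (fun hm => hb ((PySem.Set.mem_ofList _ _).1 hm))
  | cons y a' ih =>
    have hy : y = x := ha y (by simp)
    subst hy
    rw [List.cons_append, PySem.Set.ofList_cons]
    have hall : ∀ z ∈ a', z = y := fun z hz => ha z (by simp [hz])
    have hnm : y ∉ PySem.Set.discard (PySem.Set.ofList (a' ++ b)) y := fun hm =>
      ((PySem.Set.mem_discard _ _ _).1 hm).2 rfl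
    have hcons : PySem.Set.discard (y :: PySem.Set.discard (PySem.Set.ofList (a' ++ b)) y) y
        = PySem.Set.discard (PySem.Set.discard (PySem.Set.ofList (a' ++ b)) y) y := by
      simp [PySem.Set.discard]
    rw [hcons, discard_of_not_mem _ _ hnm]
    exact ih hall

-- the core: on a sorted list, run lengths are the per-distinct-element counts
lemma runLengths_eq (rs : List String) (h : rs.Pairwise (· ≤ ·)) :
    pvRunLengths rs = (PySem.Set.ofList rs).map (fun k => (rs.count k : Int)) := by
  induction rs using pvRunLengths.induct with
  | case1 => simp [pvRunLengths]
  | case2 x xs ih =>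
    set a := xs.takeWhile (· == x) with hadef
    set b := xs.dropWhile (· == x) with hbdef
    have hab : a ++ b = xs := List.takeWhile_append_dropWhile
    have ha : ∀ y ∈ a, y = x := by
      intro y hy
      have := List.mem_takeWhile_imp hy
      simpa [beq_iff_eq] using this
    have hpxs : xs.Pairwise (· ≤ ·) := (List.pairwise_cons.1 h).2
    have hxle : ∀ y ∈ xs, x ≤ y := (List.pairwise_cons.1 h).1
    have hpb : b.Pairwise (· ≤ ·) := hpxs.sublist (List.dropWhile_sublist _)
    have hxb : x ∉ b := by
      intro hxmem
      cases hb : b with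
      | nil => simp [hb] at hxmem
      | cons y b' =>
        have hyne : ¬(y == x) = true := by
          have := List.head?_dropWhile_not (· == x) xs
          rw [← hbdef, hb] at this
          simpa using this
        have hyne' : y ≠ x := by simpa [beq_iff_eq] using hyne
        have hxy : x ≤ y := by
          apply hxle
          rw [← hab, hb]; simp
        rw [hb] at hxmem
        rcases List.mem_cons.1 hxmem with h1 | h1
        · exact hyne' h1.symm
        · have hyx : y ≤ x := by
            rw [hb] at hpb
            exact (List.pairwise_cons.1 hpb).1 x h1
          exact hyne' (le_antisymm hyx hxy)
    have hset : PySem.Set.ofList (x :: xs) = x :: PySem.Set.ofList b := by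
      rw [PySem.Set.ofList_cons, ← hab, ofList_all_eq_append x a b ha hxb]
    rw [pvRunLengths, ← hadef, ← hbdef, hset, List.map_cons, ih hpb]
    simp only [List.cons.injEq]
    refine ⟨?_, ?_⟩
    · -- head: count of x
      have hcb : b.count x = 0 := List.count_eq_zero.2 hxb
      have hca : a.count x = a.length := by
        apply List.count_eq_length.2
        intro y hy; exact (ha y hy).symm
      rw [List.count_cons_self, ← hab, List.count_append, hca, hcb]
      push_cast; ring
    · -- tail: counts of the other distinct elements
      apply List.map_congr_left
      intro k hk
      have hkb : k ∈ b := (PySem.Set.mem_ofList _ _).1 hk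
      have hkx : k ≠ x := fun hkx => hxb (hkx ▸ hkb)
      have hca : a.count k = 0 := by
        apply List.count_eq_zero.2
        intro hka; exact hkx (ha k hka)
      rw [← hab] at *
      simp [List.count_append, hca, Ne.symm hkx]

-- descending sorts of permuted Int lists are equal
lemma sorted_rev_eq_of_perm (v w : List Int) (h : v.Perm w) :
    PySem.List.sorted v (fun x => x) true = PySem.List.sorted w (fun x => x) true := by
  apply PySem.List.eq_of_perm_of_pairwise_le_of_injective (key := fun x : Int => -x)
    neg_injective
  · exact ((PySem.List.sorted_perm v _ _).trans h).trans (PySem.List.sorted_perm w _ _).symm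
  · exact (PySem.List.sorted_pairwise_rev v (fun x => x)).imp (fun hab => neg_le_neg hab)
  · exact (PySem.List.sorted_pairwise_rev w (fun x => x)).imp (fun hab => neg_le_neg hab)

-- ===== VERDICT (by name: the statement is the Claim_ definition above) =====
theorem classify_by_rank_spec : Claim_equal_classify_by_rank := by
  intro hand _
  unfold Spec_classify_by_rank classify_by_rank classify_by_rank_alt
  set ranks := hand.map (·.2) with hr
  set rs := PySem.List.sorted ranks (fun x => x) false with hrs
  apply sorted_rev_eq_of_perm
  rw [dictA_eq_counter]
  have hvals : (PySem.Dict.counter ranks).values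
      = (PySem.Dict.counter ranks).keys.map (fun k => (PySem.Dict.counter ranks).getD k 0) :=
    PySem.Dict.values_eq_map_keys _ (PySem.Dict.nodup_keys_counter _) 0
  rw [hvals]
  have hperm : rs.Perm ranks := PySem.List.sorted_perm _ _ _
  have hkeys : ((PySem.Set.ofList ranks) : List String).Perm (PySem.Set.ofList rs) := by
    apply (List.perm_ext_iff_of_nodup (PySem.Set.nodup_ofList _) (PySem.Set.nodup_ofList _)).2
    intro k
    rw [PySem.Set.mem_ofList, PySem.Set.mem_ofList]
    exact (hperm.mem_iff).symm
  have hsorted : rs.Pairwise (· ≤ ·) := by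
    have := PySem.List.sorted_pairwise ranks (fun x : String => x)
    simpa using this
  rw [runLengths_eq rs hsorted]
  have h1 : (PySem.Dict.counter ranks).keys.map (fun k => (PySem.Dict.counter ranks).getD k 0)
      = (PySem.Set.ofList ranks).map (fun k => (ranks.count k : Int)) := by
    rw [PySem.Dict.keys_counter]
    apply List.map_congr_left
    intro k _
    exact PySem.Dict.getD_counter _ _
  rw [h1]
  have h2 : ((PySem.Set.ofList rs).map (fun k => (rs.count k : Int)))
      = (PySem.Set.ofList rs).map (fun k => (ranks.count k : Int)) := by
    apply List.map_congr_left
    intro k _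
    rw [hperm.count_eq]
  rw [h2]
  exact hkeys.map _
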